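-- pv_equiv track=rewrite | github.com/waegaein/boj | pass/2231/main.py | get_base_aux
-- ===== SOURCE A (Python) =====
-- def get_constructed(num):
--     return sum(int(c) for c in str(num)) + num
--
-- def get_base_aux(num, base):
--     if num < 18:
--         return 1
--
--     base_next = base * 10 + 9
--     constructed_next = get_constructed(base_next)
--
--     if constructed_next > num:
--         return base
--     else:
--         return get_base_aux(num, base_next)
-- ===== SOURCE B (Python) =====
-- def get_base_aux(num, base):
--     if num < 18:
--         return 1
--     while True:
--         base_next = base * 10 + 9
--         s, n = 0, base_next
--         while n > 0:
--             s += n % 10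
--             n //= 10
--         if s + base_next > num:
--             return base
--         base = base_next
-- ===== Notes on version B (the rewrite author's own statement) =====
-- stated objective: alternative
-- what changed: Tail recursion replaced by an iterative while-loop, and the string-based digit sum (sum(int(c) for c in str(n))) replaced by a purely arithmetic divmod digit-sum loop.
-- outside the precondition, e.g. on get_base_aux(20, -1): A raises ValueError, B does not finish within the time limit
import Mathlib
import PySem

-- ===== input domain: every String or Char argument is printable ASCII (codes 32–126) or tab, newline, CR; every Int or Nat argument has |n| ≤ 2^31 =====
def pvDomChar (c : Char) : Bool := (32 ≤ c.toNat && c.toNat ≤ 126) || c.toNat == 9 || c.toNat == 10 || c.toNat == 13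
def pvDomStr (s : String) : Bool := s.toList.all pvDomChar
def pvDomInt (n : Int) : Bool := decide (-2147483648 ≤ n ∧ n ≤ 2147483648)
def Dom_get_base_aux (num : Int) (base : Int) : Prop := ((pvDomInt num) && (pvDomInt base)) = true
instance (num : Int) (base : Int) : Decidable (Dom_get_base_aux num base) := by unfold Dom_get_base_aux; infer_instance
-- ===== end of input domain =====

-- B replaces A's tail recursion by an iterative loop and A's string-based digit sum by an
-- arithmetic divmod loop (objective: alternative; runtimes too small for a timing run to compare).


-- ===== PORT A =====
-- get_constructed: hand port of `sum(int(c) for c in str(num)) + num`.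
-- `int(c)` is ported as c.toNat - 48, exact for digit characters, i.e. for num ≥ 0;
-- for num < 0 Python raises ValueError on the '-' character (those inputs are outside Pre_).
def pyGetConstructed (num : Int) : Int :=
  (PySem.Int.toChars num).foldl (fun acc c => acc + ((c.toNat : Int) - 48)) 0 + num

-- A's tail recursion; the fuel argument only makes the recursion total in Lean
-- (outside Pre_ the Python recursion raises; inside Pre_ ∩ Dom far fewer than 100 steps occur).
def getBaseAuxRec (fuel : Nat) (num base : Int) : Int :=
  match fuel with
  | 0 => base
  | fuel + 1 =>
    if num < 18 then 1
    else
      let base_next := base * 10 + 9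
      let constructed_next := pyGetConstructed base_next
      if constructed_next > num then base else getBaseAuxRec fuel num base_next

def get_base_aux (num : Int) (base : Int) : Int := getBaseAuxRec 100 num base

-- ===== PORT B =====
-- B's inner `while n > 0: s += n % 10; n //= 10` loop.
-- Python's // and % coincide with PySem.Int.floordiv/mod; divisor 10 > 0.
def pvDigitSumLoop (n : Int) (s : Int) : Int :=
  if 0 < n then pvDigitSumLoop (PySem.Int.floordiv n 10) (s + PySem.Int.mod n 10) else s
  termination_by n.toNat
  decreasing_by
    simp only [PySem.Int.floordiv]
    have h := @Int.fdiv_eq_ediv n 10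
    simp at h
    omega

-- B's outer while-True loop (fuel only for totality in Lean, as in port A).
def altLoop (fuel : Nat) (num base : Int) : Int :=
  match fuel with
  | 0 => base
  | fuel + 1 =>
    let base_next := base * 10 + 9
    if pvDigitSumLoop base_next 0 + base_next > num then base else altLoop fuel num base_next

def get_base_aux_alt (num : Int) (base : Int) : Int :=
  if num < 18 then 1 else altLoop 100 num base

-- ===== PRECONDITION & SPEC =====
-- Pre_ excludes exactly the inputs where Python A raises: for num ≥ 18 and base < 0,
-- base_next is negative, str(base_next) contains '-', and int('-') raises ValueError.
def Pre_get_base_aux (num : Int) (base : Int) : Prop := num < 18 ∨ 0 ≤ base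
instance (num : Int) (base : Int) : Decidable (Pre_get_base_aux num base) := by
  unfold Pre_get_base_aux; infer_instance
def pvWitness_get_base_aux : Int × Int := (100, 0)

def Spec_get_base_aux (num : Int) (base : Int) (out : Int) : Prop := out = get_base_aux_alt num base
instance (num : Int) (base : Int) (out : Int) : Decidable (Spec_get_base_aux num base out) := by
  unfold Spec_get_base_aux; infer_instance

-- ===== CLAIM (what is proved, stated in full; the proofs are below) =====
def Claim_equal_get_base_aux : Prop := ∀ (num : Int) (base : Int), Dom_get_base_aux num base → Pre_get_base_aux num base → Spec_get_base_aux num base (get_base_aux num base)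

-- ===== LEMMAS AND PROOFS =====

-- arithmetic digit sum of a natural number (reference value both ports are reduced to)
def pvNatDigitSum (n : Nat) : Nat :=
  if n = 0 then 0 else pvNatDigitSum (n / 10) + n % 10
  termination_by n
  decreasing_by omega

theorem pvDigitChar_toNat {d : Nat} (h : d < 10) : (Nat.digitChar d).toNat = 48 + d := by
  interval_cases d <;> rfl

def pvFoldD (l : List Char) (s : Int) : Int :=
  l.foldl (fun acc c => acc + ((c.toNat : Int) - 48)) s

theorem pvFoldD_cons (c : Char) (l : List Char) (s : Int) :
    pvFoldD (c :: l) s = pvFoldD l (s + ((c.toNat : Int) - 48)) := rfl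

theorem pvFoldD_toDigitsCore (f : Nat) : ∀ (n : Nat) (rest : List Char) (s : Int), n < f →
    pvFoldD (Nat.toDigitsCore 10 f n rest) s = pvFoldD rest (s + pvNatDigitSum n) := by
  induction f with
  | zero => intro n rest s h; omega
  | succ f ih =>
    intro n rest s h
    rw [Nat.toDigitsCore]
    by_cases h0 : n / 10 = 0
    · have hn : n < 10 := by omega
      rw [if_pos h0, pvFoldD_cons, pvDigitChar_toNat (Nat.mod_lt n (by omega))]
      have hds : pvNatDigitSum n = n % 10 := by
        rw [pvNatDigitSum.eq_def]
        by_cases hz : n = 0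
        · simp [hz]
        · rw [if_neg hz, h0, pvNatDigitSum.eq_def]; simp
      rw [hds]
      congr 1
      push_cast
      ring
    · rw [if_neg h0]
      have hlt : n / 10 < f := by
        have : n / 10 < n := Nat.div_lt_self (by omega) (by omega)
        omega
      rw [ih (n / 10) _ s hlt, pvFoldD_cons, pvDigitChar_toNat (Nat.mod_lt n (by omega))]
      have hsum : pvNatDigitSum n = pvNatDigitSum (n / 10) + n % 10 := by
        rw [pvNatDigitSum.eq_def, if_neg (by omega : ¬ n = 0)]
      rw [hsum]
      congr 1
      push_cast
      ring

theorem pvDigitSumLoop_natCast (m : Nat) : ∀ s : Int,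
    pvDigitSumLoop (m : Int) s = s + (pvNatDigitSum m : Int) := by
  induction m using Nat.strong_induction_on with
  | _ m ih =>
    intro s
    rw [pvDigitSumLoop.eq_def]
    by_cases h : m = 0
    · subst h
      simp [pvNatDigitSum]
    · rw [if_pos (by exact_mod_cast Nat.pos_of_ne_zero h)]
      have hdiv : PySem.Int.floordiv (m : Int) 10 = ((m / 10 : Nat) : Int) := by
        have h10 := @Int.fdiv_eq_ediv (m : Int) 10
        simp at h10
        simp [PySem.Int.floordiv, h10]
      have hmod : PySem.Int.mod (m : Int) 10 = ((m % 10 : Nat) : Int) := by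
        have h10 := @Int.fmod_eq_emod (m : Int) 10
        simp at h10
        simp [PySem.Int.mod, h10]
      have hm : pvNatDigitSum m = pvNatDigitSum (m / 10) + m % 10 := by
        rw [pvNatDigitSum.eq_def, if_neg h]
      rw [hdiv, hmod, ih (m / 10) (Nat.div_lt_self (Nat.pos_of_ne_zero h) (by omega)), hm]
      push_cast
      ring

-- the two ports' per-step "constructed" values agree on nonnegative arguments
theorem pvConstructed_eq {b : Int} (hb : 0 ≤ b) :
    pyGetConstructed b = pvDigitSumLoop b 0 + b := by
  have hb' : b = ((b.toNat : Nat) : Int) := by omega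
  rw [pyGetConstructed, PySem.Int.toChars, if_neg (by omega), Nat.toDigits]
  have hfold := pvFoldD_toDigitsCore (b.toNat + 1) b.toNat [] 0 (by omega)
  simp only [pvFoldD, List.foldl_nil] at hfold
  rw [hfold, hb', pvDigitSumLoop_natCast, Int.toNat_natCast]

theorem pvLoop_eq (fuel : Nat) : ∀ (num base : Int), 0 ≤ base → ¬ num < 18 →
    getBaseAuxRec fuel num base = altLoop fuel num base := by
  induction fuel with
  | zero => intro num base _ _; rfl
  | succ fuel ih =>
    intro num base hb hn
    rw [getBaseAuxRec, altLoop, if_neg hn]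
    simp only
    rw [pvConstructed_eq (by omega)]
    by_cases hc : pvDigitSumLoop (base * 10 + 9) 0 + (base * 10 + 9) > num
    · rw [if_pos hc, if_pos hc]
    · rw [if_neg hc, if_neg hc, ih num (base * 10 + 9) (by omega) hn]

-- ===== VERDICT (by name: the statement is the Claim_ definition above) =====
theorem get_base_aux_spec : Claim_equal_get_base_aux := by
  intro num base _ hpre
  unfold Spec_get_base_aux get_base_aux get_base_aux_alt
  by_cases hn : num < 18
  · rw [if_pos hn, getBaseAuxRec, if_pos hn]
  · rw [if_neg hn]
    exact pvLoop_eq 100 num base (hpre.resolve_left hn) hn
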